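-- pv_equiv track=rewrite | github.com/Emory-Melody/GraphSlim | graphslim/config.py | _get_category_for_key
-- ===== SOURCE A (Python) =====
-- PARAMETER_CATEGORIES = {
--     'Common': {
--         'dataset', 'method', 'gpu_id', 'device', 'setting', 'split', 'run_reduction', 'run_eval',
--         'run_inter_eval', 'eval_interval', 'hidden', 'condense_model', 'epochs', 'agg', 'multi_label',
--         'dis_metric', 'lr_adj', 'lr_feat', 'optim', 'threshold', 'dropout', 'ntrans', 'with_bn',
--         'save_path', 'load_path', 'eval_whole', 'with_structure', 'lr', 'weight_decay', 'pre_norm',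
--         'outer_loop', 'inner_loop', 'reduction_rate', 'seed', 'nlayers', 'verbose', 'soft_label',
--         'init', 'checkpoints', 'logger','metric'
--     },
--     'Downstream Evaluation': {
--         'eval_epochs', 'eval_model', 'final_eval_model', 'eval_wd', 'eval_loss', 'activation', 'alpha'
--     },
--     'Attack': {
--         'ptb_r', 'attack'
--     },
--     'Coarsening': {
--         'coarsen_strategy'
--     },
--     'MSGC': {
--         'batch_adj'
--     },
--     'GCSNTK': {
--         'mx_size'
--     },
--     'Tspanner': {
--         'ts'
--     },
--     'SimGC': {
--         'feat_alpha', 'smoothness_alpha'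
--     },
--     'GDEM': {
--         'eigen_k', 'ratio', 'lr_eigenvec', 'gamma', 'test_epochs',
--     },
-- }
--
-- def _get_category_for_key(key):
--     if key in PARAMETER_CATEGORIES['Common']:
--         return 'Common'
--     for category, keys in PARAMETER_CATEGORIES.items():
--         if category == 'Common':
--             continue
--         if key in keys:
--             return category
--     return None
-- ===== SOURCE B (Python) =====
-- # Flat reverse-lookup table: every parameter key mapped directly to its category.
-- # Keys are globally unique across categories, so a single literal dict is exact.
-- KEY_TO_CATEGORY = {
--     'dataset': 'Common',
--     'method': 'Common',
--     'gpu_id': 'Common',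
--     'device': 'Common',
--     'setting': 'Common',
--     'split': 'Common',
--     'run_reduction': 'Common',
--     'run_eval': 'Common',
--     'run_inter_eval': 'Common',
--     'eval_interval': 'Common',
--     'hidden': 'Common',
--     'condense_model': 'Common',
--     'epochs': 'Common',
--     'agg': 'Common',
--     'multi_label': 'Common',
--     'dis_metric': 'Common',
--     'lr_adj': 'Common',
--     'lr_feat': 'Common',
--     'optim': 'Common',
--     'threshold': 'Common',
--     'dropout': 'Common',
--     'ntrans': 'Common',
--     'with_bn': 'Common',
--     'save_path': 'Common',
--     'load_path': 'Common',
--     'eval_whole': 'Common',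
--     'with_structure': 'Common',
--     'lr': 'Common',
--     'weight_decay': 'Common',
--     'pre_norm': 'Common',
--     'outer_loop': 'Common',
--     'inner_loop': 'Common',
--     'reduction_rate': 'Common',
--     'seed': 'Common',
--     'nlayers': 'Common',
--     'verbose': 'Common',
--     'soft_label': 'Common',
--     'init': 'Common',
--     'checkpoints': 'Common',
--     'logger': 'Common',
--     'metric': 'Common',
--     'eval_epochs': 'Downstream Evaluation',
--     'eval_model': 'Downstream Evaluation',
--     'final_eval_model': 'Downstream Evaluation',
--     'eval_wd': 'Downstream Evaluation',
--     'eval_loss': 'Downstream Evaluation',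
--     'activation': 'Downstream Evaluation',
--     'alpha': 'Downstream Evaluation',
--     'ptb_r': 'Attack',
--     'attack': 'Attack',
--     'coarsen_strategy': 'Coarsening',
--     'batch_adj': 'MSGC',
--     'mx_size': 'GCSNTK',
--     'ts': 'Tspanner',
--     'feat_alpha': 'SimGC',
--     'smoothness_alpha': 'SimGC',
--     'eigen_k': 'GDEM',
--     'ratio': 'GDEM',
--     'lr_eigenvec': 'GDEM',
--     'gamma': 'GDEM',
--     'test_epochs': 'GDEM',
-- }
--
--
-- def _get_category_for_key(key):
--     return KEY_TO_CATEGORY.get(key)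
-- ===== Notes on version B (the rewrite author's own statement) =====
-- stated objective: faster
-- what changed: Replaces A's per-call membership scan over the nested category->keys sets with one flat literal reverse table KEY_TO_CATEGORY (keys are globally unique across categories), making each call a single dict lookup with no loop at all.
import Mathlib
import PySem

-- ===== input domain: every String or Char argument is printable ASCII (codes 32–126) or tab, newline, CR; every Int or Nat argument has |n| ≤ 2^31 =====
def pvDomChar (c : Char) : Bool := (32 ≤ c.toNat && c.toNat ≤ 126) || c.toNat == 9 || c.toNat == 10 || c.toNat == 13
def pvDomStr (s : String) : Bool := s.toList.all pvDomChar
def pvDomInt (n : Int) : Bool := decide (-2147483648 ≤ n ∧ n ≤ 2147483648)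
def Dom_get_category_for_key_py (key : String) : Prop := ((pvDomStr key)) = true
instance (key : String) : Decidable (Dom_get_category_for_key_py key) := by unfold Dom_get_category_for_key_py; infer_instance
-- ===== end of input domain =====

-- B replaces A's per-call scan over the nested category→keys sets by a single flat literal
-- reverse table key→category (keys are globally unique), so a call is one dict lookup.

-- ===== PORT A =====
-- A's module constant PARAMETER_CATEGORIES: an insertion-ordered dict of sets,
-- modelled as the association list of its items (each value a duplicate-free set literal).
def pvSetCommon : PySem.Set String := ["dataset", "method", "gpu_id", "device", "setting", "split", "run_reduction", "run_eval",
  "run_inter_eval", "eval_interval", "hidden", "condense_model", "epochs", "agg", "multi_label",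
  "dis_metric", "lr_adj", "lr_feat", "optim", "threshold", "dropout", "ntrans", "with_bn",
  "save_path", "load_path", "eval_whole", "with_structure", "lr", "weight_decay", "pre_norm",
  "outer_loop", "inner_loop", "reduction_rate", "seed", "nlayers", "verbose", "soft_label",
  "init", "checkpoints", "logger", "metric"]
def pvSetEval : PySem.Set String := ["eval_epochs", "eval_model", "final_eval_model", "eval_wd", "eval_loss", "activation", "alpha"]
def pvSetAttack : PySem.Set String := ["ptb_r", "attack"]
def pvSetCoarsening : PySem.Set String := ["coarsen_strategy"]
def pvSetMSGC : PySem.Set String := ["batch_adj"]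
def pvSetGCSNTK : PySem.Set String := ["mx_size"]
def pvSetTspanner : PySem.Set String := ["ts"]
def pvSetSimGC : PySem.Set String := ["feat_alpha", "smoothness_alpha"]
def pvSetGDEM : PySem.Set String := ["eigen_k", "ratio", "lr_eigenvec", "gamma", "test_epochs"]

def pvCatItems : List (String × PySem.Set String) :=
  [("Common", pvSetCommon), ("Downstream Evaluation", pvSetEval), ("Attack", pvSetAttack),
   ("Coarsening", pvSetCoarsening), ("MSGC", pvSetMSGC), ("GCSNTK", pvSetGCSNTK),
   ("Tspanner", pvSetTspanner), ("SimGC", pvSetSimGC), ("GDEM", pvSetGDEM)]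

-- the 'for category, keys in PARAMETER_CATEGORIES.items():' loop with 'continue' on 'Common'
def pvALoop (key : String) : List (String × PySem.Set String) → Option String
  | [] => none
  | (category, keys) :: rest =>
    if category == "Common" then pvALoop key rest
    else if keys.contains key then some category
    else pvALoop key rest

def get_category_for_key_py (key : String) : Option String :=
  if pvSetCommon.contains key then some "Common"   -- PARAMETER_CATEGORIES['Common'] is the dict's first entry
  else pvALoop key pvCatItems

-- ===== PORT B =====
-- Source B's flat literal dict KEY_TO_CATEGORY (keys globally unique, so Dict.mk of the pairs is exact)
def KEY_TO_CATEGORY : PySem.Dict String String := PySem.Dict.mk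
  [("dataset", "Common"), ("method", "Common"), ("gpu_id", "Common"), ("device", "Common"), ("setting", "Common"), ("split", "Common"), ("run_reduction", "Common"), ("run_eval", "Common"), ("run_inter_eval", "Common"), ("eval_interval", "Common"), ("hidden", "Common"), ("condense_model", "Common"), ("epochs", "Common"), ("agg", "Common"), ("multi_label", "Common"), ("dis_metric", "Common"), ("lr_adj", "Common"), ("lr_feat", "Common"), ("optim", "Common"), ("threshold", "Common"), ("dropout", "Common"), ("ntrans", "Common"), ("with_bn", "Common"), ("save_path", "Common"), ("load_path", "Common"), ("eval_whole", "Common"), ("with_structure", "Common"), ("lr", "Common"), ("weight_decay", "Common"), ("pre_norm", "Common"), ("outer_loop", "Common"), ("inner_loop", "Common"), ("reduction_rate", "Common"), ("seed", "Common"), ("nlayers", "Common"), ("verbose", "Common"), ("soft_label", "Common"), ("init", "Common"), ("checkpoints", "Common"), ("logger", "Common"), ("metric", "Common"),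
   ("eval_epochs", "Downstream Evaluation"), ("eval_model", "Downstream Evaluation"), ("final_eval_model", "Downstream Evaluation"), ("eval_wd", "Downstream Evaluation"), ("eval_loss", "Downstream Evaluation"), ("activation", "Downstream Evaluation"), ("alpha", "Downstream Evaluation"),
   ("ptb_r", "Attack"), ("attack", "Attack"),
   ("coarsen_strategy", "Coarsening"),
   ("batch_adj", "MSGC"),
   ("mx_size", "GCSNTK"),
   ("ts", "Tspanner"),
   ("feat_alpha", "SimGC"), ("smoothness_alpha", "SimGC"),
   ("eigen_k", "GDEM"), ("ratio", "GDEM"), ("lr_eigenvec", "GDEM"), ("gamma", "GDEM"), ("test_epochs", "GDEM")]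

def get_category_for_key_py_alt (key : String) : Option String :=
  KEY_TO_CATEGORY.get? key

-- ===== PRECONDITION & SPEC =====
def Spec_get_category_for_key_py (key : String) (out : Option String) : Prop := out = get_category_for_key_py_alt key
instance (key : String) (out : Option String) : Decidable (Spec_get_category_for_key_py key out) := by unfold Spec_get_category_for_key_py; infer_instance

-- ===== CLAIM (what is proved, stated in full; the proofs are below) =====
def Claim_equal_get_category_for_key_py : Prop := ∀ (key : String), Dom_get_category_for_key_py key → Spec_get_category_for_key_py key (get_category_for_key_py key)

-- ===== LEMMAS AND PROOFS =====

-- first category (in list order) whose key set contains `key`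
def pvScan (key : String) : List (String × PySem.Set String) → Option String
  | [] => none
  | p :: rest => if p.2.contains key then some p.1 else pvScan key rest

-- flatten the grouped items into (key, category) pairs, group order then in-group order
def pvFlatten (l : List (String × PySem.Set String)) : List (String × String) :=
  l.flatMap (fun p => p.2.map (fun k => (k, p.1)))

theorem pv_get_mk_map (key c : String) (ks : List String) (rest : List (String × String)) :
    (PySem.Dict.mk (ks.map (fun k => (k, c)) ++ rest)).get? key =
      if ks.contains key then some c else (PySem.Dict.mk rest).get? key := by
  induction ks with
  | nil => simp
  | cons k ks ih =>
    simp only [List.map_cons, List.cons_append, PySem.Dict.get?_mk_cons, ih, List.contains_cons]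
    by_cases h : k = key
    · subst h; simp
    · have h' : ¬ key = k := fun e => h e.symm
      simp [h, h']

theorem pv_get_flatten (key : String) (l : List (String × PySem.Set String)) :
    (PySem.Dict.mk (pvFlatten l)).get? key = pvScan key l := by
  induction l with
  | nil => simp [pvFlatten, pvScan, PySem.Dict.get?]
  | cons p l ih =>
    simp only [pvFlatten, List.flatMap_cons, pv_get_mk_map, pvScan] at *
    by_cases h : key ∈ p.2 <;> simp [h, ih]

theorem pv_alt_eq_scan (key : String) :
    get_category_for_key_py_alt key = pvScan key pvCatItems := by
  have h : KEY_TO_CATEGORY = PySem.Dict.mk (pvFlatten pvCatItems) := by decide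
  rw [get_category_for_key_py_alt, h, pv_get_flatten]

-- ===== VERDICT (by name: the statement is the Claim_ definition above) =====
theorem get_category_for_key_py_spec : Claim_equal_get_category_for_key_py := by
  intro key _
  show get_category_for_key_py key = get_category_for_key_py_alt key
  rw [pv_alt_eq_scan]
  by_cases h : pvSetCommon.contains key = true <;>
    simp [get_category_for_key_py, pvALoop, pvScan, pvCatItems]
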